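-- pv_equiv track=rewrite | github.com/Matanhalfon/intro-crooswords | crossword.py | word_fix
-- ===== SOURCE A (Python) =====
-- def counting(lst):
--     "A function that count word in a list and return the the word that \
--      found and the number of times in a tuple"
--     lst2 = []
--     for word in lst:
--         the_count = lst.count(word)
--         tup = word, the_count
--         if tup in lst2:
--             continue
--         else:
--             lst2.append((word, the_count))
--     return lst2
--
-- def word_fix(word_from_search):
--     '''A function that sorts the words alphabetically.
--     In addition we separate the words to different
--     rows, by using \n'''
--     list_for_file = []
--     word_count = counting(word_from_search)
--     for i in range(len(word_count)):
--         list_for_file.append(word_count[i][0] + ',' + str(word_count[i][1]) + "\n")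
--     list_for_file.sort()
--     if len(list_for_file)!=0:
--         list_for_file[-1]=list_for_file[-1].rstrip()
--     return list_for_file
-- ===== SOURCE B (Python) =====
-- def word_fix(word_from_search):
--     sw = sorted(word_from_search)
--     pairs = []
--     i, n = 0, len(sw)
--     while i < n:
--         j = i + 1
--         while j < n and sw[j] == sw[i]:
--             j += 1
--         pairs.append((sw[i], j - i))
--         i = j
--     lines = sorted(w + ',' + str(c) + '\n' for w, c in pairs)
--     if lines:
--         lines[-1] = lines[-1].rstrip()
--     return lines
-- ===== Notes on version B (the rewrite author's own statement) =====
-- stated objective: faster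
-- what changed: B sorts the words first and then computes each distinct word's count in one linear scan over contiguous equal runs (sort-then-group), instead of A's repeated lst.count plus accumulator-membership scans; the formatted lines are still sorted at the end so the output matches A exactly.
import Mathlib
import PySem

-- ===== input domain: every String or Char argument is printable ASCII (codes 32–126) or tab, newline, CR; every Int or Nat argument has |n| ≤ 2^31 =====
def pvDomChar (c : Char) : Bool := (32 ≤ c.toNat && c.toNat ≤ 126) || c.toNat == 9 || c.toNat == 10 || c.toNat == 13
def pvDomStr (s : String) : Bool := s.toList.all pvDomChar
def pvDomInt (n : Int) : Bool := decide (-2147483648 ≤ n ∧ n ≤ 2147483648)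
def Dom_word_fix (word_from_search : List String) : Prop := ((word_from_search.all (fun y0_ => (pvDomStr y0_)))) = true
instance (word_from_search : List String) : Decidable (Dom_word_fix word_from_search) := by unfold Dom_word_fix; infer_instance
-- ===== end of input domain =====

-- B sorts the words first and counts each distinct word in one linear run-scan over the sorted list, instead of A's repeated .count and membership scans; same output.


-- ===== PORT A =====
-- helper 'counting' of A: for word in lst, skip if (word, lst.count(word)) already appended
def countingA (lst : List String) : List (String × Int) :=
  lst.foldl (fun lst2 word =>
    let tup : String × Int := (word, (PySem.List.count lst word : Int))
    if tup ∈ lst2 then lst2 else lst2 ++ [tup]) []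

def word_fix (word_from_search : List String) : List String :=
  let word_count := countingA word_from_search
  let list_for_file :=
    (PySem.List.pyRange 0 (word_count.length : Int) 1).foldl
      (fun acc i =>
        acc ++ [(PySem.List.pyGetD word_count i ("", 0)).1 ++ "," ++
                PySem.Int.toStr (PySem.List.pyGetD word_count i ("", 0)).2 ++ "\n"]) []
  let s := PySem.List.sorted list_for_file (fun x => x) false
  -- list_for_file[-1] = list_for_file[-1].rstrip() ported as replace-last (index -1 on a nonempty list)
  if h : s = [] then s else s.dropLast ++ [PySem.Str.rstrip (s.getLast h)]

-- ===== PORT B =====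
-- B's outer while loop: scan the sorted list run by run; the inner 'while sw[j]==sw[i]' is the
-- takeWhile length j - i, and 'i = j' is the drop
def runsB : List String → List (String × Int)
  | [] => []
  | w :: rest =>
    (w, ((rest.takeWhile (fun x => x == w)).length + 1 : Int)) ::
      runsB (rest.drop (rest.takeWhile (fun x => x == w)).length)
termination_by l => l.length
decreasing_by
  simp only [List.length_drop, List.length_cons]; omega

def word_fix_alt (word_from_search : List String) : List String :=
  let sw := PySem.List.sorted word_from_search (fun x => x) false
  let pairs := runsB sw
  let lines := PySem.List.sorted
    (pairs.map (fun p => p.1 ++ "," ++ PySem.Int.toStr p.2 ++ "\n")) (fun x => x) false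
  if h : lines = [] then lines else lines.dropLast ++ [PySem.Str.rstrip (lines.getLast h)]

-- ===== PRECONDITION & SPEC =====
def Spec_word_fix (word_from_search : List String) (out : List String) : Prop := out = word_fix_alt word_from_search
instance (word_from_search : List String) (out : List String) : Decidable (Spec_word_fix word_from_search out) := by unfold Spec_word_fix; infer_instance

-- ===== CLAIM (what is proved, stated in full; the proofs are below) =====
def Claim_equal_word_fix : Prop := ∀ (word_from_search : List String), Dom_word_fix word_from_search → Spec_word_fix word_from_search (word_fix word_from_search)

-- ===== LEMMAS AND PROOFS =====

-- A's counting loop, started from any deduped-set prefix, appends first occurrences paired with their count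
lemma counting_fold (c : String → Int) (l : List String) (S : PySem.Set String) :
    l.foldl (fun lst2 word =>
      let tup : String × Int := (word, c word)
      if tup ∈ lst2 then lst2 else lst2 ++ [tup]) (S.map (fun w => (w, c w)))
    = (l.foldl PySem.Set.add S).map (fun w => (w, c w)) := by
  induction l generalizing S with
  | nil => rfl
  | cons w l ih =>
    simp only [List.foldl_cons]
    have hmem : ((w, c w) ∈ S.map (fun v => (v, c v))) ↔ w ∈ S := by
      constructor
      · rintro h
        obtain ⟨v, hv, he⟩ := List.mem_map.mp h
        cases he; exact hv
      · intro h; exact List.mem_map.mpr ⟨w, h, rfl⟩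
    by_cases hw : w ∈ S
    · rw [if_pos (hmem.mpr hw)]
      have : PySem.Set.add S w = S := by
        simp [PySem.Set.add, PySem.Set.contains, hw]
      rw [this]; exact ih S
    · rw [if_neg (fun h => hw (hmem.mp h))]
      have : PySem.Set.add S w = S ++ [w] := by
        simp [PySem.Set.add, PySem.Set.contains, hw]
      rw [this]
      have he : (S.map (fun v => (v, c v))) ++ [(w, c w)]
          = (S ++ [w]).map (fun v => (v, c v)) := by simp
      rw [he]
      exact ih (S ++ [w])

lemma countingA_eq (lst : List String) :
    countingA lst = (PySem.Set.ofList lst).map (fun w => (w, (lst.count w : Int))) := by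
  have := counting_fold (fun w => (lst.count w : Int)) lst PySem.Set.empty
  simpa [countingA, PySem.Set.ofList_eq_foldl, PySem.Set.empty, PySem.List.count_eq] using this

-- fold Set.add over a list not containing w keeps a leading w in front
lemma foldl_add_cons (w : String) (S : PySem.Set String) (d : List String)
    (hwd : w ∉ d) (hwS : w ∉ S) :
    d.foldl PySem.Set.add (w :: S) = w :: d.foldl PySem.Set.add S := by
  induction d generalizing S with
  | nil => rfl
  | cons a d ih =>
    have haw : a ≠ w := fun h => hwd (h ▸ List.mem_cons_self)
    have hwd' : w ∉ d := fun h => hwd (List.mem_cons_of_mem a h)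
    simp only [List.foldl_cons]
    by_cases haS : a ∈ S
    · have h1 : PySem.Set.add (w :: S) a = w :: S := by
        simp [PySem.Set.add, PySem.Set.contains, haS]
      have h2 : PySem.Set.add S a = S := by
        simp [PySem.Set.add, PySem.Set.contains, haS]
      rw [h1, h2]; exact ih S hwd' hwS
    · have h1 : PySem.Set.add (w :: S) a = w :: (S ++ [a]) := by
        simp [PySem.Set.add, PySem.Set.contains, haS, haw]
      have h2 : PySem.Set.add S a = S ++ [a] := by
        simp [PySem.Set.add, PySem.Set.contains, haS]
      rw [h1, h2]
      exact ih (S ++ [a]) hwd' (by simp [hwS, Ne.symm haw])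

-- on a ≤-sorted list, B's run scan produces exactly (distinct word, its count), in order
-- length of takeWhile locates dropWhile
lemma drop_length_takeWhile (p : String → Bool) (l : List String) :
    l.drop (l.takeWhile p).length = l.dropWhile p := by
  induction l with
  | nil => rfl
  | cons a l ih =>
    by_cases h : p a
    · simp [h, ih]
    · simp [h]

lemma runsB_sorted (l : List String) (hs : l.Pairwise (· ≤ ·)) :
    runsB l = (PySem.Set.ofList l).map (fun w => (w, (l.count w : Int))) := by
  induction l using runsB.induct with
  | case1 => simp [runsB]
  | case2 w rest ih =>
    set t := rest.takeWhile (fun x => x == w) with ht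
    set d := rest.drop t.length with hd
    have hdw : d = rest.dropWhile (fun x => x == w) := by
      rw [hd, ht]
      exact drop_length_takeWhile _ rest
    -- every element of t equals w
    have htw : ∀ x ∈ t, x = w := by
      intro x hx
      have := List.mem_takeWhile_imp hx
      simpa using this
    -- rest = t ++ d
    have hrest : rest = t ++ d := by
      rw [hdw, ht, List.takeWhile_append_dropWhile]
    -- w ≤ every element of rest
    have hwle : ∀ x ∈ rest, w ≤ x := by
      intro x hx
      exact (List.pairwise_cons.mp hs).1 x hx
    -- no element of d equals w
    have hdne : ∀ x ∈ d, x ≠ w := by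
      rw [hdw]
      intro x hx
      rcases hq : rest.dropWhile (fun x => x == w) with _ | ⟨y, tl⟩
      · rw [hq] at hx; simp at hx
      · have hy : ¬ (y == w) = true := by
          have := List.head_dropWhile_not (fun x => x == w) (l := rest) (by simp [hq])
          simpa [hq] using this
        have hyw : y ≠ w := by simpa using hy
        have hyr : y ∈ rest := (List.dropWhile_sublist _).subset (by rw [hq]; exact List.mem_cons_self)
        have hwy : w < y := lt_of_le_of_ne (hwle y hyr) (Ne.symm hyw)
        rw [hq] at hx
        rcases List.mem_cons.mp hx with h | h
        · exact h ▸ hyw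
        · -- x after y in the sorted suffix: y ≤ x
          have hsd : (rest.dropWhile (fun x => x == w)).Pairwise (· ≤ ·) :=
            ((List.pairwise_cons.mp hs).2).sublist (List.dropWhile_sublist _)
          have hyx : y ≤ x := by
            rw [hq] at hsd
            exact (List.pairwise_cons.mp hsd).1 x h
          exact fun hxw => absurd (hxw ▸ hyx) (not_le.mpr hwy)
    have hwd : w ∉ d := fun h => hdne w h rfl
    -- counts
    have hcw : (w :: rest).count w = t.length + 1 := by
      have hct : t.count w = t.length := by
        rw [List.count_eq_length]
        intro x hx; exact (htw x hx).symm
      have hcd : d.count w = 0 := by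
        rw [List.count_eq_zero]; exact hwd
      rw [hrest]
      simp [List.count_append, hct, hcd]
    have hcv : ∀ v ∈ d, (w :: rest).count v = d.count v := by
      intro v hv
      have hvw : v ≠ w := hdne v hv
      have hct : t.count v = 0 := by
        rw [List.count_eq_zero]
        intro hvt; exact hvw (htw v hvt)
      rw [hrest]
      simp [List.count_append, hct, Ne.symm hvw]
    -- Set.ofList (w :: rest) = w :: Set.ofList d
    have hset : PySem.Set.ofList (w :: rest) = w :: PySem.Set.ofList d := by
      rw [PySem.Set.ofList_eq_foldl, hrest]
      have h0 : PySem.Set.add ([] : PySem.Set String) w = [w] := rfl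
      rw [List.foldl_cons, h0, List.foldl_append]
      have htfold : t.foldl PySem.Set.add [w] = [w] := by
        have : ∀ u : List String, (∀ x ∈ u, x = w) → u.foldl PySem.Set.add [w] = [w] := by
          intro u
          induction u with
          | nil => intro _; rfl
          | cons a u ihu =>
            intro hu
            have ha : a = w := hu a List.mem_cons_self
            have h1 : PySem.Set.add [w] a = [w] := by
              simp [PySem.Set.add, PySem.Set.contains, ha]
            rw [List.foldl_cons, h1]
            exact ihu (fun x hx => hu x (List.mem_cons_of_mem a hx))
        exact this t htw
      rw [htfold]
      have hfc := foldl_add_cons w PySem.Set.empty d hwd (by simp [PySem.Set.empty])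
      simpa [PySem.Set.empty, PySem.Set.ofList_eq_foldl] using hfc
    -- sortedness of d
    have hsd : d.Pairwise (· ≤ ·) := by
      rw [hdw]
      exact ((List.pairwise_cons.mp hs).2).sublist (List.dropWhile_sublist _)
    -- assemble
    rw [runsB, hset]
    simp only [List.map_cons]
    rw [← ht, ← hd]
    congr 1
    · have hc : (((w :: rest).count w : Int)) = (t.length : Int) + 1 := by
        rw [hcw]; push_cast; ring
      rw [hc]
    · rw [ih hsd]
      refine (List.map_congr_left ?_).symm
      intro v hv
      rw [hcv v (by simpa [pysem] using hv)]

-- A's distinct words and B's (from the sorted list) are permutations with the same counts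
lemma lines_perm (xs : List String) :
    ((runsB (PySem.List.sorted xs (fun x => x) false)).map
        (fun p => p.1 ++ "," ++ PySem.Int.toStr p.2 ++ "\n")).Perm
      ((countingA xs).map (fun p => p.1 ++ "," ++ PySem.Int.toStr p.2 ++ "\n")) := by
  set sw := PySem.List.sorted xs (fun x => x) false with hsw
  have hp : sw.Perm xs := PySem.List.sorted_perm xs (fun x => x) false
  have hrb : runsB sw = (PySem.Set.ofList sw).map (fun w => (w, (sw.count w : Int))) :=
    runsB_sorted sw (by simpa using PySem.List.sorted_pairwise xs (fun x => x))
  have hcnt : ∀ w, sw.count w = xs.count w := fun w => hp.count_eq w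
  have hsetperm : (PySem.Set.ofList sw).Perm (PySem.Set.ofList xs) := by
    apply (List.perm_ext_iff_of_nodup (PySem.Set.nodup_ofList _) (PySem.Set.nodup_ofList _)).mpr
    intro v
    simp only [pysem]
    exact ⟨fun h => hp.mem_iff.mp h, fun h => hp.mem_iff.mpr h⟩
  rw [hrb, countingA_eq]
  have h1 : (PySem.Set.ofList sw).map (fun w => (w, (sw.count w : Int)))
      = (PySem.Set.ofList sw).map (fun w => (w, (xs.count w : Int))) := by
    apply List.map_congr_left; intro v _; rw [hcnt v]
  rw [h1]
  exact (hsetperm.map _).map _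

-- ===== VERDICT (by name: the statement is the Claim_ definition above) =====
theorem word_fix_spec : Claim_equal_word_fix := by
  intro xs _
  unfold Spec_word_fix word_fix word_fix_alt
  have ha : (PySem.List.pyRange 0 ((countingA xs).length : Int) 1).foldl
      (fun acc i =>
        acc ++ [(PySem.List.pyGetD (countingA xs) i ("", 0)).1 ++ "," ++
                PySem.Int.toStr (PySem.List.pyGetD (countingA xs) i ("", 0)).2 ++ "\n"]) []
      = (countingA xs).map (fun p => p.1 ++ "," ++ PySem.Int.toStr p.2 ++ "\n") := by
    rw [PySem.List.foldl_pyRange_zero_pyGetD' (countingA xs) ("", 0)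
      (fun acc p => acc ++ [p.1 ++ "," ++ PySem.Int.toStr p.2 ++ "\n"]) []]
    exact PySem.List.foldl_append_singleton_eq_map _ _ _
  simp only [ha]
  have hsorted :
      PySem.List.sorted ((countingA xs).map (fun p => p.1 ++ "," ++ PySem.Int.toStr p.2 ++ "\n"))
        (fun x => x) false
      = PySem.List.sorted ((runsB (PySem.List.sorted xs (fun x => x) false)).map
          (fun p => p.1 ++ "," ++ PySem.Int.toStr p.2 ++ "\n")) (fun x => x) false :=
    PySem.List.sorted_eq_sorted_of_perm _ _ (fun x => x) (fun _ _ h => h) (lines_perm xs).symm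
  simp only [hsorted]
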